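-- pv_equiv track=rewrite | github.com/tsu2000/binom_tree | funcs.py | generate_step_pairs
-- ===== SOURCE A (Python) =====
-- from typing import Dict, List, Tuple
--
-- def generate_step_pairs(steps: int) -> List[List[int]]:
--     result = {}
--     current_number = 1
--     for i in range(steps):
--         row_numbers = [num for num in range(current_number, current_number + i + 1)]
--         result[i] = row_numbers
--         current_number += (i + 1)
--
--     pairs = []
--     for k, v in result.items():
--         for i in v:
--             pairs.append([i, i + k + 1])
--             pairs.append([i, i + k + 2])
--
--     return pairs
-- ===== SOURCE B (Python) =====
-- from typing import List
--
-- def generate_step_pairs(steps: int) -> List[List[int]]: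
--     # Enumerate edges from the CHILD side: walk the child rows 1..steps and,
--     # for each node j of a child row, emit the edge from its left parent
--     # (j - r - 1, unless j is the row's first node) and from its right parent
--     # (j - r, unless j is the row's last node).  Left-parent-before-right-parent
--     # within a row yields exactly parent-major order, so no reordering is needed.
--     edges = []
--     for r in range(1, steps + 1):        # child rows
--         first = r * (r + 1) // 2 + 1     # number of the first node of row r
--         for j in range(first, first + r + 1):
--             if j > first:
--                 edges.append([j - r - 1, j])   # edge from left parent
--             if j < first + r:
--                 edges.append([j - r, j])       # edge from right parent
--     return edges
-- ===== Notes on version B (the rewrite author's own statement) =====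
-- stated objective: alternative
-- what changed: B enumerates edges from the child side - for each node of each child row it emits the edges from its left and right parents, guarded by row-boundary conditionals - instead of A's building a dict of rows and emitting each parent's two children; the dict and the parent-major double-append disappear.
import Mathlib
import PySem

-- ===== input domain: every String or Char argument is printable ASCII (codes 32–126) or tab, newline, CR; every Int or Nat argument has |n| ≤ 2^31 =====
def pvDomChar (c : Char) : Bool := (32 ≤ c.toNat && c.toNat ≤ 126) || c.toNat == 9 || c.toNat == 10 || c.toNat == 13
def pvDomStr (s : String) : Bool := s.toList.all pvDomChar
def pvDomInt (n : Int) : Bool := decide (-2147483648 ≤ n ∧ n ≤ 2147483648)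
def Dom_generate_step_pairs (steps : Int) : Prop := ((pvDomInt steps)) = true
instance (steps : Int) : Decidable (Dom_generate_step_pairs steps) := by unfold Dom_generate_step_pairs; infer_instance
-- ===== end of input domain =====

-- B enumerates edges from the child side (each node's parents, with row-boundary
-- conditionals) instead of A's dict of rows emitting each parent's children (objective: alternative).

-- ===== PORT A =====
def generate_step_pairs (steps : Int) : List (List Int) :=
  let st := (PySem.List.pyRange 0 steps 1).foldl
    (fun (st : PySem.Dict Int (List Int) × Int) i =>
      let row_numbers := PySem.List.pyRange st.2 (st.2 + i + 1) 1
      (st.1.insert i row_numbers, st.2 + (i + 1)))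
    (PySem.Dict.empty, 1)
  st.1.items.foldl
    (fun pairs kv =>
      kv.2.foldl (fun ps i => ps ++ [[i, i + kv.1 + 1], [i, i + kv.1 + 2]]) pairs)
    []

-- ===== PORT B =====
def generate_step_pairs_alt (steps : Int) : List (List Int) :=
  (PySem.List.pyRange 1 (steps + 1) 1).foldl
    (fun edges r =>
      let first := PySem.Int.floordiv (r * (r + 1)) 2 + 1
      (PySem.List.pyRange first (first + r + 1) 1).foldl
        (fun es j =>
          let es := if first < j then es ++ [[j - r - 1, j]] else es
          if j < first + r then es ++ [[j - r, j]] else es)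
        edges)
    []

-- ===== PRECONDITION & SPEC =====
def Spec_generate_step_pairs (steps : Int) (out : List (List Int)) : Prop := out = generate_step_pairs_alt steps
instance (steps : Int) (out : List (List Int)) : Decidable (Spec_generate_step_pairs steps out) := by unfold Spec_generate_step_pairs; infer_instance

-- ===== CLAIM (what is proved, stated in full; the proofs are below) =====
def Claim_equal_generate_step_pairs : Prop := ∀ (steps : Int), Dom_generate_step_pairs steps → Spec_generate_step_pairs steps (generate_step_pairs steps)

-- ===== LEMMAS AND PROOFS =====

-- the triangular number k*(k+1)/2 as an Int, row k's contents, and A's dict as a table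
def pvTri (k : Nat) : Int := ((k * (k + 1) / 2 : Nat) : Int)

def pvRow (k : Nat) : List Int := PySem.List.pyRange (pvTri k + 1) (pvTri k + 1 + k + 1) 1

def pvTable (n : Nat) : List (Int × List Int) :=
  (List.range n).map (fun (k : Nat) => ((k : Int), pvRow k))

-- the common value of both programs: row-major list of the two edges of every parent
def pvPairs (n : Nat) : List (List Int) :=
  (List.range n).flatMap (fun k =>
    (List.range (k + 1)).flatMap (fun t : Nat =>
      [[pvTri k + 1 + (t : Int), pvTri k + 1 + (t : Int) + (k : Int) + 1],
       [pvTri k + 1 + (t : Int), pvTri k + 1 + (t : Int) + (k : Int) + 2]]))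

theorem pvTable_succ (n : Nat) : pvTable (n + 1) = pvTable n ++ [((n : Int), pvRow n)] := by
  simp [pvTable, List.range_succ]

theorem pvTri_succ (n : Nat) : pvTri (n + 1) = pvTri n + (n + 1) := by
  unfold pvTri
  have h : (n + 1) * (n + 1 + 1) = n * (n + 1) + (n + 1) * 2 := by ring
  rw [h, Nat.add_mul_div_right _ _ (by norm_num : 0 < 2)]
  push_cast; ring

-- A's first loop builds exactly the table and the counter pvTri n + 1
theorem pvBuild (n : Nat) :
    (PySem.List.pyRange 0 (n : Int) 1).foldl
      (fun (st : PySem.Dict Int (List Int) × Int) i =>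
        (st.1.insert i (PySem.List.pyRange st.2 (st.2 + i + 1) 1), st.2 + (i + 1)))
      (PySem.Dict.empty, 1)
    = (PySem.Dict.mk (pvTable n), pvTri n + 1) := by
  induction n with
  | zero =>
    rw [show ((0 : Nat) : Int) = 0 from rfl, PySem.List.pyRange_one_eq_nil le_rfl]
    rfl
  | succ m ih =>
    rw [show ((m + 1 : Nat) : Int) = (m : Int) + 1 by push_cast; ring,
        PySem.List.pyRange_one_succ_right (by positivity), List.foldl_append, ih]
    simp only [List.foldl_cons, List.foldl_nil]
    have hfresh : (PySem.Dict.mk (pvTable m)).contains ((m : Int)) = false := by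
      simp only [PySem.Dict.contains_mk, pvTable]
      rw [List.any_eq_false]
      intro x hx
      simp only [List.mem_map, List.mem_range] at hx
      obtain ⟨k, hk, rfl⟩ := hx
      show ¬(((k : Int), pvRow k).1 == (m : Int)) = true
      simp only [beq_iff_eq, Int.natCast_inj]
      omega
    refine Prod.ext ?_ ?_
    · apply PySem.Dict.ext
      rw [show ((PySem.Dict.mk (pvTable m)).insert (↑m) (PySem.List.pyRange (pvTri m + 1) (pvTri m + 1 + ↑m + 1) 1), pvTri m + 1 + ((m : Int) + 1)).1
            = (PySem.Dict.mk (pvTable m)).insert (↑m) (PySem.List.pyRange (pvTri m + 1) (pvTri m + 1 + ↑m + 1) 1) from rfl,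
          PySem.Dict.items_insert_of_not_contains _ _ hfresh, pvTable_succ]
      rfl
    · show pvTri m + 1 + ((m : Int) + 1) = pvTri (m + 1) + 1
      rw [pvTri_succ]; ring

-- A's emit loop over the table produces pvPairs
theorem pvEmitA (n : Nat) (acc : List (List Int)) :
    (pvTable n).foldl
      (fun pairs kv =>
        kv.2.foldl (fun ps i => ps ++ [[i, i + kv.1 + 1], [i, i + kv.1 + 2]]) pairs) acc
    = acc ++ pvPairs n := by
  induction n generalizing acc with
  | zero => simp [pvTable, pvPairs]
  | succ m ih =>
    rw [pvTable_succ, List.foldl_append, ih]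
    simp only [List.foldl_cons, List.foldl_nil]
    rw [PySem.List.foldl_append_eq_flatMap
          (fun (i : Int) => [[i, i + (m : Int) + 1], [i, i + (m : Int) + 2]])]
    have hrow : pvRow m = (List.range (m + 1)).map (fun t : Nat => pvTri m + 1 + (t : Int)) := by
      have hlen : (pvTri m + 1 + (m : Int) + 1 - (pvTri m + 1)).toNat = m + 1 := by omega
      rw [pvRow, PySem.List.pyRange_one, hlen]
    rw [hrow, List.flatMap_map]
    simp only [pvPairs, List.range_succ, List.flatMap_append, List.flatMap_cons,
      List.flatMap_nil, List.append_nil, List.append_assoc]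

-- shifting the grouping of an interleaved flatMap by one position
theorem pvShift {α : Type} (x y : Nat → α) (m : Nat) (hm : 1 ≤ m) :
    (List.range (m + 1)).flatMap
      (fun t => (if 0 < t then [y (t - 1)] else []) ++ (if t < m then [x t] else []))
    = (List.range m).flatMap (fun t => [x t, y t]) := by
  induction m, hm using Nat.le_induction with
  | base => norm_num [List.range_succ]
  | succ m hm ih =>
    have hmid : (List.range (m + 1)).flatMap
        (fun t => (if 0 < t then [y (t - 1)] else []) ++ (if t < m + 1 then [x t] else []))
      = (List.range (m + 1)).flatMap
        (fun t => (if 0 < t then [y (t - 1)] else []) ++ (if t < m then [x t] else []))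
        ++ [x m] := by
      rw [List.range_succ, List.flatMap_append, List.flatMap_append,
          List.flatMap_singleton, List.flatMap_singleton,
          List.flatMap_congr (l := List.range m)
            (g := fun t => (if 0 < t then [y (t - 1)] else []) ++ (if t < m then [x t] else []))
            (fun t ht => by
              have ht' : t < m := List.mem_range.mp ht
              have ht2 : t < m + 1 := by omega
              simp [ht', ht2]),
          if_pos (by omega : 0 < m), if_pos (by omega : m < m + 1), if_neg (by omega : ¬ m < m)]
      simp [List.append_assoc]
    rw [show List.range (m + 1 + 1) = List.range (m + 1) ++ [m + 1] from List.range_succ,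
        List.flatMap_append, List.flatMap_singleton, hmid, ih,
        if_pos (by omega : 0 < m + 1), if_neg (by omega : ¬ m + 1 < m + 1),
        show List.range (m + 1) = List.range m ++ [m] from List.range_succ,
        List.flatMap_append, List.flatMap_singleton]
    simp [List.append_assoc]

-- the closed-form row start in B equals pvTri k + 1 for k = cast of a Nat
theorem pvStart (k : Nat) :
    PySem.Int.floordiv ((k : Int) * ((k : Int) + 1)) 2 + 1 = pvTri k + 1 := by
  have : ((k : Int) * ((k : Int) + 1)) = ((k * (k + 1) : Nat) : Int) := by push_cast; ring
  rw [this]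
  rw [show ((2 : Int)) = ((2 : Nat) : Int) from rfl, PySem.Int.floordiv_natCast]
  rfl

theorem pvPairs_succ (m : Nat) :
    pvPairs (m + 1) = pvPairs m ++ (List.range (m + 1)).flatMap (fun t : Nat =>
      [[pvTri m + 1 + (t : Int), pvTri m + 1 + (t : Int) + (m : Int) + 1],
       [pvTri m + 1 + (t : Int), pvTri m + 1 + (t : Int) + (m : Int) + 2]]) := by
  simp [pvPairs, List.range_succ]

-- B's outer loop over child rows produces pvPairs
theorem pvEmitB (n : Nat) (acc : List (List Int)) :
    (PySem.List.pyRange 1 ((n : Int) + 1) 1).foldl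
      (fun edges r =>
        let first := PySem.Int.floordiv (r * (r + 1)) 2 + 1
        (PySem.List.pyRange first (first + r + 1) 1).foldl
          (fun es j =>
            let es := if first < j then es ++ [[j - r - 1, j]] else es
            if j < first + r then es ++ [[j - r, j]] else es)
          edges)
      acc
    = acc ++ pvPairs n := by
  induction n generalizing acc with
  | zero =>
    rw [show ((0 : Nat) : Int) + 1 = 1 by norm_num, PySem.List.pyRange_one_eq_nil le_rfl]
    simp [pvPairs]
  | succ m ih =>
    rw [show ((m + 1 : Nat) : Int) + 1 = ((m : Int) + 1) + 1 by push_cast; ring,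
        PySem.List.pyRange_one_succ_right (by omega), List.foldl_append, ih]
    simp only [List.foldl_cons, List.foldl_nil]
    have hfirst : PySem.Int.floordiv (((m : Int) + 1) * (((m : Int) + 1) + 1)) 2 + 1
        = pvTri (m + 1) + 1 := by
      rw [show ((m : Int) + 1) = ((m + 1 : Nat) : Int) by push_cast; ring, pvStart]
    rw [hfirst]
    have hbody : (fun (es : List (List Int)) (j : Int) =>
          let es := if pvTri (m + 1) + 1 < j then es ++ [[j - ((m : Int) + 1) - 1, j]] else es
          if j < pvTri (m + 1) + 1 + ((m : Int) + 1) then es ++ [[j - ((m : Int) + 1), j]] else es)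
        = fun es j => es ++
          ((if pvTri (m + 1) + 1 < j then [[j - ((m : Int) + 1) - 1, j]] else []) ++
           (if j < pvTri (m + 1) + 1 + ((m : Int) + 1) then [[j - ((m : Int) + 1), j]] else [])) := by
      funext es j
      split_ifs <;> simp
    rw [hbody, PySem.List.foldl_append_eq_flatMap]
    have hr : PySem.List.pyRange (pvTri (m + 1) + 1) (pvTri (m + 1) + 1 + ((m : Int) + 1) + 1) 1
        = (List.range (m + 2)).map (fun t : Nat => pvTri (m + 1) + 1 + (t : Int)) := by
      have hlen : (pvTri (m + 1) + 1 + ((m : Int) + 1) + 1 - (pvTri (m + 1) + 1)).toNat = m + 2 := by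
        omega
      rw [PySem.List.pyRange_one, hlen]
    rw [hr, List.flatMap_map, pvPairs_succ]
    have hcongr : ∀ t ∈ List.range (m + 2),
        ((if pvTri (m + 1) + 1 < pvTri (m + 1) + 1 + (t : Int) then
            [[pvTri (m + 1) + 1 + (t : Int) - ((m : Int) + 1) - 1, pvTri (m + 1) + 1 + (t : Int)]] else []) ++
         (if pvTri (m + 1) + 1 + (t : Int) < pvTri (m + 1) + 1 + ((m : Int) + 1) then
            [[pvTri (m + 1) + 1 + (t : Int) - ((m : Int) + 1), pvTri (m + 1) + 1 + (t : Int)]] else []))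
      = ((if 0 < t then
            [(fun u : Nat => [pvTri m + 1 + (u : Int), pvTri m + 1 + (u : Int) + (m : Int) + 2]) (t - 1)] else []) ++
         (if t < m + 1 then
            [(fun u : Nat => [pvTri m + 1 + (u : Int), pvTri m + 1 + (u : Int) + (m : Int) + 1]) t] else [])) := by
      intro t _
      have htri := pvTri_succ m
      split_ifs <;>
        first
        | (exfalso; omega)
        | (simp only [List.cons.injEq, List.nil_append, List.append_nil,
            List.cons_append, and_true]
           omega)
    rw [List.flatMap_congr hcongr,
        pvShift (fun u : Nat => [pvTri m + 1 + (u : Int), pvTri m + 1 + (u : Int) + (m : Int) + 1])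
                (fun u : Nat => [pvTri m + 1 + (u : Int), pvTri m + 1 + (u : Int) + (m : Int) + 2])
                (m + 1) (by omega)]
    simp [List.append_assoc]

-- ===== VERDICT (by name: the statement is the Claim_ definition above) =====
theorem generate_step_pairs_spec : Claim_equal_generate_step_pairs := by
  intro steps _
  show generate_step_pairs steps = generate_step_pairs_alt steps
  by_cases h : steps ≤ 0
  · unfold generate_step_pairs generate_step_pairs_alt
    rw [PySem.List.pyRange_one_eq_nil h, PySem.List.pyRange_one_eq_nil (by omega)]
    rfl
  · obtain ⟨n, rfl⟩ : ∃ n : Nat, steps = (n : Int) :=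
      ⟨steps.toNat, (Int.toNat_of_nonneg (by omega)).symm⟩
    unfold generate_step_pairs generate_step_pairs_alt
    rw [pvBuild n]
    exact (pvEmitA n []).trans (pvEmitB n []).symm
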